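-- pv_equiv track=rewrite | github.com/Ethan-Yang0101/Resume-BERT-NER-Project | project_label_studio/project_tool/project_auto_completer.py | complete_span_span_line_data
-- ===== SOURCE A (Python) =====
-- def complete_span_span_line_data(txts_list, tags_list, tokens_list):
--     '''
--     填补满足以下模式的数据：
--     时间[span]项目名[span]负责人[line]
--     项目名[span]时间[span]负责人[line]
--     项目名[span]负责人[span]时间[line]
--     '''
--     for txts, tags, tokens in zip(txts_list, tags_list, tokens_list):
--         if all([tag == 'O' for tag in tags]):
--             if sum([txt == '[span]' for txt in txts]) == 2:
--                 span_index = [index for (index, txt) in enumerate(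
--                     txts) if txt == '[span]']
--                 front = tokens[:span_index[0]]
--                 mid = tokens[span_index[0]+1:span_index[1]]
--                 back = tokens[span_index[1]+1:-1]
--                 max_front = len(front) <= 10
--                 three_tmr = sum(['<TMR>' in token.split(',')
--                                  for token in front]) >= 3
--                 three_tms = sum(['<TMS>' in token.split(',')
--                                  for token in front]) >= 3
--                 if max_front and (three_tmr or three_tms):
--                     tags[0] = 'B-timeRange'
--                     for i in range(1, span_index[0]):
--                         tags[i] = 'I-timeRange'
--                     tags[span_index[0]+1] = 'B-projectName'
--                     for i in range(span_index[0]+2, span_index[1]):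
--                         tags[i] = 'I-projectName'
--                     for i in range(span_index[1]+1, len(tags)-1):
--                         tags[i] = 'O'
--                     continue
--                 max_mid = len(mid) <= 10
--                 three_tmr = sum(['<TMR>' in token.split(',')
--                                  for token in mid]) >= 3
--                 three_tms = sum(['<TMS>' in token.split(',')
--                                  for token in mid]) >= 3
--                 if max_mid and (three_tmr or three_tms):
--                     tags[0] = 'B-projectName'
--                     for i in range(1, span_index[0]):
--                         tags[i] = 'I-projectName'
--                     tags[span_index[0]+1] = 'B-timeRange'
--                     for i in range(span_index[0]+2, span_index[1]):
--                         tags[i] = 'I-timeRange'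
--                     for i in range(span_index[1]+1, len(tags)-1):
--                         tags[i] = 'O'
--                     continue
--                 max_back = len(back) <= 10
--                 three_tmr = sum(['<TMR>' in token.split(',')
--                                  for token in back]) >= 3
--                 three_tms = sum(['<TMS>' in token.split(',')
--                                  for token in back]) >= 3
--                 if max_back and (three_tmr or three_tms):
--                     tags[0] = 'B-projectName'
--                     for i in range(1, span_index[0]):
--                         tags[i] = 'I-projectName'
--                     for i in range(span_index[0]+1, span_index[1]):
--                         tags[i] = 'O'
--                     tags[span_index[1]+1] = 'B-timeRange'
--                     for i in range(span_index[1]+2, len(tags)-1):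
--                         tags[i] = 'I-timeRange'
--                     continue
--     return tags_list
-- ===== SOURCE B (Python) =====
-- def complete_span_span_line_data(txts_list, tags_list, tokens_list):
--     '''
--     Single-statistics-pass re-implementation: one sweep over the tokens
--     accumulates (length, <TMR>-hits, <TMS>-hits) for all three segments at
--     once; the first qualifying segment number then determines every tag
--     positionally through a pure label formula, instead of slicing each
--     segment, re-scanning it, and writing label ranges in place.
--     Return value matches A (A mutates the tag rows in place, B builds
--     fresh rows).
--     '''
--     result = list(tags_list)
--     for k, (txts, tags, tokens) in enumerate(zip(txts_list, tags_list, tokens_list)):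
--         if any(tag != 'O' for tag in tags):
--             continue
--         spans = [i for i, txt in enumerate(txts) if txt == '[span]']
--         if len(spans) != 2:
--             continue
--         s0, s1 = spans
--         last = len(tokens) - 1
--         stats = [[0, 0, 0], [0, 0, 0], [0, 0, 0]]
--         for i, tok in enumerate(tokens):
--             if i < s0:
--                 seg = 0
--             elif s0 < i < s1:
--                 seg = 1
--             elif s1 < i < last:
--                 seg = 2
--             else:
--                 continue
--             parts = tok.split(',')
--             stats[seg][0] += 1
--             stats[seg][1] += '<TMR>' in parts
--             stats[seg][2] += '<TMS>' in parts
--         winner = next((w for w, (n, r, s) in enumerate(stats)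
--                        if n <= 10 and (r >= 3 or s >= 3)), None)
--         if winner is not None:
--             result[k] = [_span_label(j, winner, s0, s1, len(tags))
--                          for j in range(len(tags))]
--     return result
--
--
-- def _span_label(j, winner, s0, s1, n):
--     if winner == 0:
--         t_start, t_end, p_start, p_end = 0, s0, s0 + 1, s1
--     elif winner == 1:
--         t_start, t_end, p_start, p_end = s0 + 1, s1, 0, s0
--     else:
--         t_start, t_end, p_start, p_end = s1 + 1, n - 1, 0, s0
--     if j == t_start:
--         return 'B-timeRange'
--     if t_start < j < t_end:
--         return 'I-timeRange'
--     if j == p_start: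
--         return 'B-projectName'
--     if p_start < j < p_end:
--         return 'I-projectName'
--     return 'O'
-- ===== Notes on version B (the rewrite author's own statement) =====
-- stated objective: alternative
-- what changed: A slices the three segments and re-scans each with its own counting passes, then mutates label ranges in place branch by branch; B makes ONE statistics sweep over the tokens that accumulates (length, <TMR>-hits, <TMS>-hits) for all three segments simultaneously, picks the first qualifying segment number, and generates each output tag positionally from a pure label formula into a fresh row.
import Mathlib
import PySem

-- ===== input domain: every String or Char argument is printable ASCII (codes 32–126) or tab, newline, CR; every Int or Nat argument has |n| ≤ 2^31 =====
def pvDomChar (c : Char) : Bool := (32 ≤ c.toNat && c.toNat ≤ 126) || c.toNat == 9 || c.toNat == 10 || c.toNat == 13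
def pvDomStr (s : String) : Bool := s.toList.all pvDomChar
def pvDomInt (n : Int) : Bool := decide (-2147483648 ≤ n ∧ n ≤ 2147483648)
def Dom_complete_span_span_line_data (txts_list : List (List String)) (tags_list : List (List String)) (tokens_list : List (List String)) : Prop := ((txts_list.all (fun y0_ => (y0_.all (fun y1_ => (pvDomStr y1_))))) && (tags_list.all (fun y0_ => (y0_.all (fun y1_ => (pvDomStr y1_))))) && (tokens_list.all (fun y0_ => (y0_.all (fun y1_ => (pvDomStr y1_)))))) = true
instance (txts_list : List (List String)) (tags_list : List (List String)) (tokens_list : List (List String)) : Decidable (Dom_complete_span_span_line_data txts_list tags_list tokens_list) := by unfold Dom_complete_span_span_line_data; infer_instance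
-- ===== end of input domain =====

-- B replaces A's slice-each-segment-and-rescan / write-label-ranges-in-place scheme by one
-- statistics sweep over the tokens plus a positional label formula building a fresh row; return
-- values agree, but A mutates the tag rows in place — the equivalence is about the RETURN value.

-- shared helper: sum(mark in token.split(',') for token in seg)  (a 0/1 sum = a count)
def pvMarkCount (mark : String) (seg : List String) : Nat :=
  (seg.filter (fun tok => (PySem.Chars.splitOn tok.toList ",".toList).contains mark.toList)).length

-- shared helper: [i for i, txt in enumerate(txts) if txt == '[span]']  (index carried explicitly)
def pvSpanIdx : List String → Nat → List Nat
  | [], _ => []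
  | t :: ts, i => if t == "[span]" then i :: pvSpanIdx ts (i + 1) else pvSpanIdx ts (i + 1)

-- ===== PORT A =====
-- for i in range(a, b): tags[i] = v   (out-of-range writes are no-ops; Pre_ excludes them for A)
def pvSetRange (t : List String) (a b : Nat) (v : String) : List String :=
  (List.range' a (b - a)).foldl (fun acc i => acc.set i v) t

-- front = tokens[:s0], mid = tokens[s0+1:s1], back = tokens[s1+1:-1] are inlined below
def pvRowA (txts tags tokens : List String) : List String :=
  if tags.all (fun tag => tag == "O") then
    if (txts.filter (fun txt => txt == "[span]")).length == 2 then
      match pvSpanIdx txts 0 with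
      | [s0, s1] =>
        if (tokens.take s0).length ≤ 10 ∧
            (3 ≤ pvMarkCount "<TMR>" (tokens.take s0) ∨ 3 ≤ pvMarkCount "<TMS>" (tokens.take s0)) then
          pvSetRange
            (pvSetRange ((pvSetRange (tags.set 0 "B-timeRange") 1 s0 "I-timeRange").set (s0 + 1)
              "B-projectName") (s0 + 2) s1 "I-projectName") (s1 + 1) (tags.length - 1) "O"
        else if ((tokens.drop (s0 + 1)).take (s1 - (s0 + 1))).length ≤ 10 ∧
            (3 ≤ pvMarkCount "<TMR>" ((tokens.drop (s0 + 1)).take (s1 - (s0 + 1))) ∨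
             3 ≤ pvMarkCount "<TMS>" ((tokens.drop (s0 + 1)).take (s1 - (s0 + 1)))) then
          pvSetRange
            (pvSetRange ((pvSetRange (tags.set 0 "B-projectName") 1 s0 "I-projectName").set (s0 + 1)
              "B-timeRange") (s0 + 2) s1 "I-timeRange") (s1 + 1) (tags.length - 1) "O"
        else if ((tokens.drop (s1 + 1)).dropLast).length ≤ 10 ∧
            (3 ≤ pvMarkCount "<TMR>" ((tokens.drop (s1 + 1)).dropLast) ∨
             3 ≤ pvMarkCount "<TMS>" ((tokens.drop (s1 + 1)).dropLast)) then
          pvSetRange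
            ((pvSetRange (pvSetRange (tags.set 0 "B-projectName") 1 s0 "I-projectName")
              (s0 + 1) s1 "O").set (s1 + 1) "B-timeRange") (s1 + 2) (tags.length - 1) "I-timeRange"
        else tags
      | _ => tags   -- unreachable: the count guard forces exactly two span indices
    else tags
  else tags

def complete_span_span_line_data (txts_list : List (List String)) (tags_list : List (List String)) (tokens_list : List (List String)) : List (List String) :=
  ((txts_list.zip (tags_list.zip tokens_list)).map (fun r => pvRowA r.1 r.2.1 r.2.2)) ++
    tags_list.drop (txts_list.zip (tags_list.zip tokens_list)).length

-- ===== PORT B =====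
-- stats[seg][0] += 1; stats[seg][1] += '<TMR>' in parts; stats[seg][2] += '<TMS>' in parts
def pvStatAdd (st : Nat × Nat × Nat) (tok : String) : Nat × Nat × Nat :=
  (st.1 + 1,
   st.2.1 + (if (PySem.Chars.splitOn tok.toList ",".toList).contains "<TMR>".toList then 1 else 0),
   st.2.2 + (if (PySem.Chars.splitOn tok.toList ",".toList).contains "<TMS>".toList then 1 else 0))

-- the single statistics sweep: for i, tok in enumerate(tokens): …
def pvStatsLoop (s0 s1 last : Nat) : List String → Nat → (Nat × Nat × Nat) → (Nat × Nat × Nat) → (Nat × Nat × Nat) → ((Nat × Nat × Nat) × (Nat × Nat × Nat) × (Nat × Nat × Nat))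
  | [], _, f, m, b => (f, m, b)
  | t :: ts, i, f, m, b =>
    if i < s0 then pvStatsLoop s0 s1 last ts (i + 1) (pvStatAdd f t) m b
    else if s0 < i ∧ i < s1 then pvStatsLoop s0 s1 last ts (i + 1) f (pvStatAdd m t) b
    else if s1 < i ∧ i < last then pvStatsLoop s0 s1 last ts (i + 1) f m (pvStatAdd b t)
    else pvStatsLoop s0 s1 last ts (i + 1) f m b

-- n <= 10 and (r >= 3 or s >= 3)
def pvQualStat (st : Nat × Nat × Nat) : Bool :=
  decide (st.1 ≤ 10) && (decide (3 ≤ st.2.1) || decide (3 ≤ st.2.2))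

-- _span_label(j, winner, s0, s1, n)
def pvLabel (j winner s0 s1 n : Nat) : String :=
  let r : Nat × Nat × Nat × Nat :=
    if winner = 0 then (0, s0, s0 + 1, s1)
    else if winner = 1 then (s0 + 1, s1, 0, s0)
    else (s1 + 1, n - 1, 0, s0)
  if j = r.1 then "B-timeRange"
  else if r.1 < j ∧ j < r.2.1 then "I-timeRange"
  else if j = r.2.2.1 then "B-projectName"
  else if r.2.2.1 < j ∧ j < r.2.2.2 then "I-projectName"
  else "O"

def pvRowB (txts tags tokens : List String) : List String :=
  if tags.any (fun tag => tag != "O") then tags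
  else
    match pvSpanIdx txts 0 with
    | [s0, s1] =>
      let st := pvStatsLoop s0 s1 (tokens.length - 1) tokens 0 (0, 0, 0) (0, 0, 0) (0, 0, 0)
      match List.find? (fun p => pvQualStat p.2) [(0, st.1), (1, st.2.1), (2, st.2.2)] with
      | some p => (List.range tags.length).map (fun j => pvLabel j p.1 s0 s1 tags.length)
      | none => tags
    | _ => tags

def complete_span_span_line_data_alt (txts_list : List (List String)) (tags_list : List (List String)) (tokens_list : List (List String)) : List (List String) :=
  ((txts_list.zip (tags_list.zip tokens_list)).map (fun r => pvRowB r.1 r.2.1 r.2.2)) ++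
    tags_list.drop (txts_list.zip (tags_list.zip tokens_list)).length

-- ===== PRECONDITION & SPEC =====
-- helper for Pre_ only: a segment qualifies (length ≤ 10 and ≥ 3 '<TMR>' or '<TMS>' hits)
def pvQualifies (seg : List String) : Bool :=
  if 10 < seg.length then false
  else decide (3 ≤ pvMarkCount "<TMR>" seg) || decide (3 ≤ pvMarkCount "<TMS>" seg)

-- Pre_ excludes exactly the rows on which Python A raises IndexError: an all-'O' tag row whose
-- txts carry exactly two '[span]' markers and whose winning branch's tag assignments index past
-- the end of the tag row.  On every other input A returns normally.
def pvRowPre (txts tags tokens : List String) : Bool :=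
  if tags.any (fun tag => tag != "O") then true
  else if (txts.filter (fun txt => txt == "[span]")).length != 2 then true
  else
    -- positions of the first and the (second =) last '[span]' marker
    let s0 := txts.idxOf "[span]"
    let s1 := txts.length - 1 - txts.reverse.idxOf "[span]"
    if pvQualifies (tokens.take s0) then
      decide (s0 + 1 < tags.length ∧ s1 ≤ tags.length)
    else if pvQualifies ((tokens.drop (s0 + 1)).take (s1 - (s0 + 1))) then
      decide (s0 + 1 < tags.length ∧ s1 ≤ tags.length)
    else if pvQualifies ((tokens.drop (s1 + 1)).dropLast) then
      decide (s1 + 1 < tags.length)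
    else true

def Pre_complete_span_span_line_data (txts_list : List (List String)) (tags_list : List (List String)) (tokens_list : List (List String)) : Prop :=
  ((txts_list.zip (tags_list.zip tokens_list)).all (fun r => pvRowPre r.1 r.2.1 r.2.2)) = true

instance (txts_list : List (List String)) (tags_list : List (List String)) (tokens_list : List (List String)) : Decidable (Pre_complete_span_span_line_data txts_list tags_list tokens_list) := by unfold Pre_complete_span_span_line_data; infer_instance

def pvWitness_complete_span_span_line_data : List (List String) × List (List String) × List (List String) :=
  ([["a", "[span]", "b", "[span]", "c"]], [["O", "O", "O", "O", "O"]], [["x", "y", "z", "w", "v"]])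

def Spec_complete_span_span_line_data (txts_list : List (List String)) (tags_list : List (List String)) (tokens_list : List (List String)) (out : List (List String)) : Prop := out = complete_span_span_line_data_alt txts_list tags_list tokens_list
instance (txts_list : List (List String)) (tags_list : List (List String)) (tokens_list : List (List String)) (out : List (List String)) : Decidable (Spec_complete_span_span_line_data txts_list tags_list tokens_list out) := by unfold Spec_complete_span_span_line_data; infer_instance

-- ===== CLAIM (what is proved, stated in full; the proofs are below) =====
def Claim_equal_complete_span_span_line_data : Prop := ∀ (txts_list : List (List String)) (tags_list : List (List String)) (tokens_list : List (List String)), Dom_complete_span_span_line_data txts_list tags_list tokens_list → Pre_complete_span_span_line_data txts_list tags_list tokens_list → Spec_complete_span_span_line_data txts_list tags_list tokens_list (complete_span_span_line_data txts_list tags_list tokens_list)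

-- ===== LEMMAS AND PROOFS =====

lemma pvFoldSet_succ (t : List String) (a n : Nat) (v : String) :
    (List.range' a (n + 1)).foldl (fun acc i => acc.set i v) t
      = ((List.range' a n).foldl (fun acc i => acc.set i v) t).set (a + n) v := by
  rw [List.range'_1_concat, List.foldl_append]; rfl

lemma pvFoldSet_length (t : List String) (a n : Nat) (v : String) :
    ((List.range' a n).foldl (fun acc i => acc.set i v) t).length = t.length := by
  induction n with
  | zero => rfl
  | succ m ih => rw [pvFoldSet_succ]; simp [ih]

lemma pvFoldSet_getElem? (t : List String) (a n : Nat) (v : String) (j : Nat) :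
    ((List.range' a n).foldl (fun acc i => acc.set i v) t)[j]? =
      if a ≤ j ∧ j < a + n ∧ j < t.length then some v else t[j]? := by
  induction n with
  | zero => simp; omega
  | succ m ih =>
    rw [pvFoldSet_succ, List.getElem?_set, pvFoldSet_length, ih]
    split_ifs <;> simp_all <;> omega

lemma pvSetRange_getElem? (t : List String) (a b : Nat) (v : String) (j : Nat) :
    (pvSetRange t a b v)[j]? =
      if a ≤ j ∧ j < b ∧ j < t.length then some v else t[j]? := by
  unfold pvSetRange
  rw [pvFoldSet_getElem?]
  split_ifs <;> first | rfl | omega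

lemma pvSetRange_length (t : List String) (a b : Nat) (v : String) :
    (pvSetRange t a b v).length = t.length := pvFoldSet_length t a (b - a) v

lemma pvSet_getElem? (l : List String) (i j : Nat) (a : String) :
    (l.set i a)[j]? = if i = j ∧ j < l.length then some a else l[j]? := by
  rw [List.getElem?_set]
  split_ifs <;> simp_all

lemma pvSpanIdx_lb : ∀ (ts : List String) (i : Nat), ∀ x ∈ pvSpanIdx ts i, i ≤ x := by
  intro ts
  induction ts with
  | nil => intro i x hx; simp [pvSpanIdx] at hx
  | cons t ts ih =>
    intro i x hx
    unfold pvSpanIdx at hx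
    split at hx
    · rcases List.mem_cons.mp hx with h | h
      · omega
      · have := ih (i + 1) x h; omega
    · have := ih (i + 1) x hx; omega

lemma pvSpanIdx_lt {ts : List String} {i s0 s1 : Nat}
    (h : pvSpanIdx ts i = [s0, s1]) : s0 < s1 := by
  induction ts generalizing i with
  | nil => simp [pvSpanIdx] at h
  | cons t ts ih =>
    unfold pvSpanIdx at h
    split at h
    · have h0 : s0 = i := by injection h with h1 _; omega
      have h2 : s1 ∈ pvSpanIdx ts (i + 1) := by
        injection h with _ h2; rw [h2]; simp
      have := pvSpanIdx_lb ts (i + 1) s1 h2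
      omega
    · exact ih h

lemma pvSpanIdx_length (ts : List String) (i : Nat) :
    (pvSpanIdx ts i).length = (ts.filter (fun txt => txt == "[span]")).length := by
  induction ts generalizing i with
  | nil => rfl
  | cons t ts ih =>
    unfold pvSpanIdx
    rw [List.filter_cons]
    split
    · simp [ih]
    · exact ih (i + 1)

lemma pvAllO_getElem? {tags : List String} (h : (tags.all fun tag => tag == "O") = true)
    {j : Nat} (hj : j < tags.length) : tags[j]? = some "O" := by
  rw [List.getElem?_eq_getElem hj]
  have := (List.all_eq_true.mp h) tags[j] (List.getElem_mem hj)
  simpa using this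

lemma pvAny_eq_false {tags : List String} (h : (tags.all fun tag => tag == "O") = true) :
    (tags.any fun tag => tag != "O") = false := by
  rw [List.any_eq_false]
  intro x hx
  simpa using (List.all_eq_true.mp h) x hx

-- ---- statistics sweep = per-segment slice statistics ----

-- elements of toks whose absolute index j = i + k satisfies lo ≤ j < hi
def pvSeg (toks : List String) (i lo hi : Nat) : List String :=
  (toks.drop (lo - i)).take (hi - max i lo)

def pvStatOf (seg : List String) : Nat × Nat × Nat :=
  (seg.length, pvMarkCount "<TMR>" seg, pvMarkCount "<TMS>" seg)

def pvPadd (x y : Nat × Nat × Nat) : Nat × Nat × Nat :=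
  (x.1 + y.1, x.2.1 + y.2.1, x.2.2 + y.2.2)

lemma pvSeg_cons_mem {i lo hi : Nat} (h1 : lo ≤ i) (h2 : i < hi) (t : String) (ts : List String) :
    pvSeg (t :: ts) i lo hi = t :: pvSeg ts (i + 1) lo hi := by
  unfold pvSeg
  have e1 : lo - i = 0 := by omega
  have e2 : lo - (i + 1) = 0 := by omega
  have e3 : hi - max i lo = (hi - max (i + 1) lo) + 1 := by omega
  rw [e1, e2, e3]
  simp

lemma pvSeg_cons_skip {i lo hi : Nat} (h : i < lo ∨ hi ≤ i) (t : String) (ts : List String) :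
    pvSeg (t :: ts) i lo hi = pvSeg ts (i + 1) lo hi := by
  unfold pvSeg
  rcases h with h | h
  · have e1 : lo - i = (lo - (i + 1)) + 1 := by omega
    have e3 : hi - max i lo = hi - max (i + 1) lo := by omega
    rw [e1, e3, List.drop_succ_cons]
  · have e3 : hi - max i lo = 0 := by omega
    have e4 : hi - max (i + 1) lo = 0 := by omega
    rw [e3, e4]
    simp

lemma pvPadd_statAdd (f : Nat × Nat × Nat) (t : String) (l : List String) :
    pvPadd f (pvStatOf (t :: l)) = pvPadd (pvStatAdd f t) (pvStatOf l) := by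
  simp only [pvPadd, pvStatOf, pvStatAdd, pvMarkCount, List.filter_cons]
  split_ifs <;> simp_all <;> omega

lemma pvStatsLoop_eq (s0 s1 last : Nat) (hss : s0 ≤ s1) (toks : List String) :
    ∀ (i : Nat) (f m b : Nat × Nat × Nat),
      pvStatsLoop s0 s1 last toks i f m b =
        (pvPadd f (pvStatOf (pvSeg toks i 0 s0)),
         pvPadd m (pvStatOf (pvSeg toks i (s0 + 1) s1)),
         pvPadd b (pvStatOf (pvSeg toks i (s1 + 1) last))) := by
  induction toks with
  | nil =>
    intro i f m b
    simp [pvStatsLoop, pvSeg, pvStatOf, pvPadd, pvMarkCount]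
  | cons t ts ih =>
    intro i f m b
    unfold pvStatsLoop
    by_cases h0 : i < s0
    · rw [if_pos h0, ih,
        pvSeg_cons_mem (by omega) (by omega),
        pvSeg_cons_skip (by omega : i < s0 + 1 ∨ s1 ≤ i),
        pvSeg_cons_skip (by omega : i < s1 + 1 ∨ last ≤ i),
        pvPadd_statAdd]
    · rw [if_neg h0]
      by_cases h1 : s0 < i ∧ i < s1
      · rw [if_pos h1, ih,
          pvSeg_cons_skip (by omega : i < 0 ∨ s0 ≤ i),
          pvSeg_cons_mem (by omega) (by omega),
          pvSeg_cons_skip (by omega : i < s1 + 1 ∨ last ≤ i),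
          pvPadd_statAdd]
      · rw [if_neg h1]
        by_cases h2 : s1 < i ∧ i < last
        · rw [if_pos h2, ih,
            pvSeg_cons_skip (by omega : i < 0 ∨ s0 ≤ i),
            pvSeg_cons_skip (by omega : i < s0 + 1 ∨ s1 ≤ i),
            pvSeg_cons_mem (by omega) (by omega),
            pvPadd_statAdd]
        · rw [if_neg h2, ih,
            pvSeg_cons_skip (by omega : i < 0 ∨ s0 ≤ i),
            pvSeg_cons_skip (by omega : i < s0 + 1 ∨ s1 ≤ i),
            pvSeg_cons_skip (by omega : i < s1 + 1 ∨ last ≤ i)]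

lemma pvSeg_front (toks : List String) (s0 : Nat) :
    pvSeg toks 0 0 s0 = toks.take s0 := by
  simp [pvSeg]

lemma pvSeg_mid (toks : List String) (s0 s1 : Nat) :
    pvSeg toks 0 (s0 + 1) s1 = (toks.drop (s0 + 1)).take (s1 - (s0 + 1)) := by
  simp [pvSeg]

lemma pvSeg_back (toks : List String) (s1 : Nat) :
    pvSeg toks 0 (s1 + 1) (toks.length - 1) = (toks.drop (s1 + 1)).dropLast := by
  simp only [pvSeg, Nat.sub_zero, Nat.zero_max, List.dropLast_eq_take, List.length_drop]
  congr 1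
  omega

lemma pvPadd_zero (x : Nat × Nat × Nat) : pvPadd (0, 0, 0) x = x := by
  simp [pvPadd]

lemma pvQualStat_statOf (seg : List String) :
    pvQualStat (pvStatOf seg) = true ↔
      seg.length ≤ 10 ∧ (3 ≤ pvMarkCount "<TMR>" seg ∨ 3 ≤ pvMarkCount "<TMS>" seg) := by
  simp [pvQualStat, pvStatOf]

-- ---- the three label layouts: A's write chain = B's positional formula ----

lemma pvLabel0 (j s0 s1 n : Nat) : pvLabel j 0 s0 s1 n =
    if j = 0 then "B-timeRange"
    else if 0 < j ∧ j < s0 then "I-timeRange"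
    else if j = s0 + 1 then "B-projectName"
    else if s0 + 1 < j ∧ j < s1 then "I-projectName"
    else "O" := by
  simp [pvLabel]

lemma pvLabel1 (j s0 s1 n : Nat) : pvLabel j 1 s0 s1 n =
    if j = s0 + 1 then "B-timeRange"
    else if s0 + 1 < j ∧ j < s1 then "I-timeRange"
    else if j = 0 then "B-projectName"
    else if 0 < j ∧ j < s0 then "I-projectName"
    else "O" := by
  simp [pvLabel]

lemma pvLabel2 (j s0 s1 n : Nat) : pvLabel j 2 s0 s1 n =
    if j = s1 + 1 then "B-timeRange"
    else if s1 + 1 < j ∧ j < n - 1 then "I-timeRange"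
    else if j = 0 then "B-projectName"
    else if 0 < j ∧ j < s0 then "I-projectName"
    else "O" := by
  simp [pvLabel]

set_option maxHeartbeats 1000000 in
lemma pvRow0_eq (tags : List String) (s0 s1 : Nat) (hlt : s0 < s1)
    (hO : (tags.all fun tag => tag == "O") = true) :
    pvSetRange
        (pvSetRange ((pvSetRange (tags.set 0 "B-timeRange") 1 s0 "I-timeRange").set (s0 + 1)
          "B-projectName") (s0 + 2) s1 "I-projectName") (s1 + 1) (tags.length - 1) "O"
      = (List.range tags.length).map (fun j => pvLabel j 0 s0 s1 tags.length) := by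
  apply List.ext_getElem?
  intro j
  by_cases hj : j < tags.length
  · rw [List.getElem?_map, List.getElem?_range hj, Option.map_some]
    simp only [pvSetRange_getElem?, pvSet_getElem?, pvSetRange_length, List.length_set, pvLabel0]
    split_ifs <;> first | rfl | omega | (rw [pvAllO_getElem? hO hj])
  · rw [List.getElem?_eq_none (by simp only [pvSetRange_length, List.length_set]; omega),
        List.getElem?_eq_none (by simp only [List.length_map, List.length_range]; omega)]

set_option maxHeartbeats 1000000 in
lemma pvRow1_eq (tags : List String) (s0 s1 : Nat) (hlt : s0 < s1)
    (hO : (tags.all fun tag => tag == "O") = true) :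
    pvSetRange
        (pvSetRange ((pvSetRange (tags.set 0 "B-projectName") 1 s0 "I-projectName").set (s0 + 1)
          "B-timeRange") (s0 + 2) s1 "I-timeRange") (s1 + 1) (tags.length - 1) "O"
      = (List.range tags.length).map (fun j => pvLabel j 1 s0 s1 tags.length) := by
  apply List.ext_getElem?
  intro j
  by_cases hj : j < tags.length
  · rw [List.getElem?_map, List.getElem?_range hj, Option.map_some]
    simp only [pvSetRange_getElem?, pvSet_getElem?, pvSetRange_length, List.length_set, pvLabel1]
    split_ifs <;> first | rfl | omega | (rw [pvAllO_getElem? hO hj])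
  · rw [List.getElem?_eq_none (by simp only [pvSetRange_length, List.length_set]; omega),
        List.getElem?_eq_none (by simp only [List.length_map, List.length_range]; omega)]

set_option maxHeartbeats 1000000 in
lemma pvRow2_eq (tags : List String) (s0 s1 : Nat) (hlt : s0 < s1)
    (hO : (tags.all fun tag => tag == "O") = true) :
    pvSetRange
        ((pvSetRange (pvSetRange (tags.set 0 "B-projectName") 1 s0 "I-projectName")
          (s0 + 1) s1 "O").set (s1 + 1) "B-timeRange") (s1 + 2) (tags.length - 1) "I-timeRange"
      = (List.range tags.length).map (fun j => pvLabel j 2 s0 s1 tags.length) := by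
  apply List.ext_getElem?
  intro j
  by_cases hj : j < tags.length
  · rw [List.getElem?_map, List.getElem?_range hj, Option.map_some]
    simp only [pvSetRange_getElem?, pvSet_getElem?, pvSetRange_length, List.length_set, pvLabel2]
    split_ifs <;> first | rfl | omega | (rw [pvAllO_getElem? hO hj])
  · rw [List.getElem?_eq_none (by simp only [pvSetRange_length, List.length_set]; omega),
        List.getElem?_eq_none (by simp only [List.length_map, List.length_range]; omega)]

-- ---- row equality ----

theorem pvRow_eq (txts tags tokens : List String) :
    pvRowA txts tags tokens = pvRowB txts tags tokens := by
  unfold pvRowA pvRowB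
  by_cases hO : (tags.all fun tag => tag == "O") = true
  · have hany := pvAny_eq_false hO
    simp only [hany, Bool.false_eq_true, if_false]
    rw [if_pos hO]
    have hcnt : (txts.filter (fun txt => txt == "[span]")).length = (pvSpanIdx txts 0).length :=
      (pvSpanIdx_length txts 0).symm
    rcases hsp : pvSpanIdx txts 0 with _ | ⟨s0, _ | ⟨s1, _ | ⟨s2, rest⟩⟩⟩
    all_goals rw [hcnt, hsp]
    · simp
    · simp
    · -- exactly two span indices
      simp only [List.length_cons, List.length_nil, Nat.reduceAdd, beq_self_eq_true, if_true]
      have hlt : s0 < s1 := pvSpanIdx_lt hsp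
      rw [pvStatsLoop_eq s0 s1 (tokens.length - 1) (by omega) tokens 0 (0, 0, 0) (0, 0, 0) (0, 0, 0)]
      rw [pvSeg_back tokens s1]
      simp only [pvPadd_zero, pvSeg_front, pvSeg_mid]
      cases hq1 : pvQualStat (pvStatOf (tokens.take s0)) with
      | true =>
        rw [if_pos ((pvQualStat_statOf _).mp hq1)]
        simp only [List.find?, hq1]
        exact pvRow0_eq tags s0 s1 hlt hO
      | false =>
        rw [if_neg (by intro hc; rw [(pvQualStat_statOf _).mpr hc] at hq1; cases hq1)]
        cases hq2 : pvQualStat (pvStatOf ((tokens.drop (s0 + 1)).take (s1 - (s0 + 1)))) with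
        | true =>
          rw [if_pos ((pvQualStat_statOf _).mp hq2)]
          simp only [List.find?, hq1, hq2]
          exact pvRow1_eq tags s0 s1 hlt hO
        | false =>
          rw [if_neg (by intro hc; rw [(pvQualStat_statOf _).mpr hc] at hq2; cases hq2)]
          cases hq3 : pvQualStat (pvStatOf ((tokens.drop (s1 + 1)).dropLast)) with
          | true =>
            rw [if_pos ((pvQualStat_statOf _).mp hq3)]
            simp only [List.find?, hq1, hq2, hq3]
            exact pvRow2_eq tags s0 s1 hlt hO
          | false =>
            rw [if_neg (by intro hc; rw [(pvQualStat_statOf _).mpr hc] at hq3; cases hq3)]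
            simp only [List.find?, hq1, hq2, hq3]
    · simp
  · rw [if_neg hO, if_pos (by
      rw [List.any_eq_true]
      have h2 := hO
      rw [List.all_eq_true] at h2
      push Not at h2
      obtain ⟨x, hx, hxe⟩ := h2
      exact ⟨x, hx, by simpa using hxe⟩)]

-- ===== VERDICT (by name: the statement is the Claim_ definition above) =====
theorem complete_span_span_line_data_spec : Claim_equal_complete_span_span_line_data := by
  intro txts_list tags_list tokens_list _ hpre
  unfold Spec_complete_span_span_line_data complete_span_span_line_data complete_span_span_line_data_alt
  unfold Pre_complete_span_span_line_data at hpre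
  rw [List.all_eq_true] at hpre
  congr 1
  apply List.map_congr_left
  intro r hr
  exact pvRow_eq r.1 r.2.1 r.2.2
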